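-- pv_equiv track=rewrite | github.com/Zoushuang86/Data-structure-and-algorithm | 04-Heap/print_heap.py | getLevelAssign
-- ===== SOURCE A (Python) =====
-- def getLevelAssign(List, limit):
--     # 观察范围是[0, limit]的完全二叉树tree，
--     # 然后得到tree对应的满二叉树的每层的信息
--     # 包括 每层开始节点的所在数组索引levelStart
--     #     每层结束节点的所在数组索引+1 levelLimit
--     #     每层节点个数（虽然没用到）
--     assign = []
--     levelStart = 0
--     levelCount = 1  # 每层节点的个数，2 的幂
--     levelLimit = 1  # 每层节点索引的限制
--     while (levelStart < limit):
--         # 基本信息弄成一维数组，放到一个二维数组中，以栈的方式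
--         assign.insert(0, [levelStart, levelLimit, levelCount])
--
--         levelCount = levelCount << 1
--         levelStart = levelCount - 1
--         levelLimit += levelCount
--     # 返回时，assign[0]是满二叉树最后一层的信息，assign[1]是满二叉树倒数第二层的信息
--     return assign
-- ===== SOURCE B (Python) =====
-- def getLevelAssign(List, limit):
--     # level i exists iff 2**i <= limit; closed-form triple per level, emitted top level last
--     n = limit.bit_length() if limit > 0 else 0
--     return [[2 ** i - 1, 2 ** (i + 1) - 1, 2 ** i] for i in range(n - 1, -1, -1)]
-- ===== Notes on version B (the rewrite author's own statement) =====
-- stated objective: simpler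
-- what changed: Replaces the incremental while-loop with front-insertion by a closed form: level count n = limit.bit_length(), then one comprehension emitting [2^i-1, 2^(i+1)-1, 2^i] for i from n-1 down to 0.
import Mathlib
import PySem

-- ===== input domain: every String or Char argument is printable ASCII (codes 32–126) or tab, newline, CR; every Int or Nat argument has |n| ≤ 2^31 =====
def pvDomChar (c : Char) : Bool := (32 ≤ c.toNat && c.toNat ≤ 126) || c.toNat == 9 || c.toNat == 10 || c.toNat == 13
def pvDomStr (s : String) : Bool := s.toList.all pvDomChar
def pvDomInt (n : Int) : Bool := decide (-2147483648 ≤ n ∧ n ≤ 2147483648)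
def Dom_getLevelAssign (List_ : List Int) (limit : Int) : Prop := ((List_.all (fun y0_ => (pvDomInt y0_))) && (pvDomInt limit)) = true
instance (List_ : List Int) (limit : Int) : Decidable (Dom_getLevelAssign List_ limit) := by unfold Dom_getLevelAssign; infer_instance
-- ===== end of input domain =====

-- B replaces A's incremental while-loop (front-insertion accumulator) by a closed form per
-- level: n = bit_length(limit) levels, each emitted directly from its index (simpler).


-- ===== PORT A =====
-- the while loop, step for step; 'fuel' only bounds the recursion (limit+1 iterations
-- always suffice from the initial state, see lemma loopA_spec below)
def loopA (fuel : Nat) (limit : Int) (assign : List (List Int))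
    (levelStart levelCount levelLimit : Int) : List (List Int) :=
  match fuel with
  | 0 => assign
  | f + 1 =>
    if levelStart < limit then
      loopA f limit ([levelStart, levelLimit, levelCount] :: assign)
        (levelCount <<< (1:Nat) - 1) (levelCount <<< (1:Nat)) (levelLimit + levelCount <<< (1:Nat))
    else assign

def getLevelAssign (List_ : List Int) (limit : Int) : List (List Int) :=
  loopA (limit.toNat + 1) limit [] 0 1 1

-- ===== PORT B =====
def getLevelAssign_alt (List_ : List Int) (limit : Int) : List (List Int) :=
  let n : Nat := if 0 < limit then limit.toNat.log2 + 1 else 0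
  (List.range n).reverse.map (fun i => [2 ^ i - 1, 2 ^ (i + 1) - 1, (2 : Int) ^ i])

-- ===== PRECONDITION & SPEC =====
def Spec_getLevelAssign (List_ : List Int) (limit : Int) (out : List (List Int)) : Prop := out = getLevelAssign_alt List_ limit
instance (List_ : List Int) (limit : Int) (out : List (List Int)) : Decidable (Spec_getLevelAssign List_ limit out) := by unfold Spec_getLevelAssign; infer_instance

-- ===== CLAIM (what is proved, stated in full; the proofs are below) =====
def Claim_equal_getLevelAssign : Prop := ∀ (List_ : List Int) (limit : Int), Dom_getLevelAssign List_ limit → Spec_getLevelAssign List_ limit (getLevelAssign List_ limit)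

-- ===== LEMMAS AND PROOFS =====

def pvRow (i : Nat) : List Int := [2 ^ i - 1, 2 ^ (i + 1) - 1, (2 : Int) ^ i]

-- the loop, started at level i with k levels still to emit, prepends rows k-1+i … i
theorem loopA_spec (k : Nat) : ∀ (fuel i : Nat) (limit : Int) (acc : List (List Int)),
    k ≤ fuel → (∀ j : Nat, (2 : Int) ^ (i + j) ≤ limit ↔ j < k) →
    loopA fuel limit acc ((2 : Int) ^ i - 1) (2 ^ i) (2 ^ (i + 1) - 1)
      = ((List.range' i k).map pvRow).reverse ++ acc := by
  induction k with
  | zero =>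
    intro fuel i limit acc _ hch
    have h0 : ¬ ((2 : Int) ^ i - 1 < limit) := by
      have := (hch 0).not
      simp at this
      omega
    cases fuel with
    | zero => simp [loopA]
    | succ f => simp [loopA, h0]
  | succ k ih =>
    intro fuel i limit acc hf hch
    obtain ⟨f, rfl⟩ : ∃ f, fuel = f + 1 := ⟨fuel - 1, by omega⟩
    have h0 : (2 : Int) ^ i - 1 < limit := by
      have := (hch 0).mpr (by omega)
      simp at this; omega
    have e1 : (2 : Int) ^ i <<< (1:Nat) = 2 ^ (i + 1) := by
      rw [Int.shiftLeft_eq]; ring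
    have e2 : (2 : Int) ^ (i + 1) - 1 + 2 ^ (i + 1) = 2 ^ (i + 1 + 1) - 1 := by ring
    rw [loopA, if_pos h0, e1, e2,
        ih f (i + 1) limit _ (by omega)
          (fun j => by rw [show i + 1 + j = i + (j + 1) from by omega, hch (j + 1)]; omega)]
    simp [List.range'_succ, pvRow]
theorem log2_char (m : Nat) (hm : 0 < m) (j : Nat) : 2 ^ j ≤ m ↔ j < m.log2 + 1 := by
  rw [Nat.lt_succ_iff, Nat.le_log2 (by omega)]

theorem levels_char (limit : Int) (j : Nat) :
    (2 : Int) ^ (0 + j) ≤ limit ↔ j < (if 0 < limit then limit.toNat.log2 + 1 else 0) := by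
  simp only [Nat.zero_add]
  split_ifs with h
  · rw [← log2_char limit.toNat (by omega) j]
    have : limit = (limit.toNat : Int) := by omega
    rw [this]
    exact_mod_cast Iff.rfl
  · constructor
    · intro hle
      have : (1 : Int) ≤ 2 ^ j := one_le_pow₀ (by norm_num)
      omega
    · omega

theorem fuel_enough (limit : Int) :
    (if 0 < limit then limit.toNat.log2 + 1 else 0) ≤ limit.toNat + 1 := by
  split_ifs with h
  · have h1 : 2 ^ limit.toNat.log2 ≤ limit.toNat := Nat.log2_self_le (by omega)
    have h2 : limit.toNat.log2 < 2 ^ limit.toNat.log2 := Nat.lt_two_pow_self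
    omega
  · omega

-- ===== VERDICT (by name: the statement is the Claim_ definition above) =====
theorem getLevelAssign_spec : Claim_equal_getLevelAssign := by
  intro List_ limit _
  unfold Spec_getLevelAssign getLevelAssign getLevelAssign_alt
  have h := loopA_spec (if 0 < limit then limit.toNat.log2 + 1 else 0)
    (limit.toNat + 1) 0 limit [] (fuel_enough limit) (levels_char limit)
  norm_num at h
  rw [h]
  simp [List.range_eq_range', pvRow, List.map_reverse]
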